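-- pv_equiv track=rewrite | github.com/vivek100/ledgerlab-openenv | finbench_env/server/finbench_environment.py | _diff_files
-- ===== SOURCE A (Python) =====
-- from typing import Any, Dict, List, Optional
--
-- def _diff_files(
--
--     before: Dict[str, Dict[str, Any]],
--     after: Dict[str, Dict[str, Any]],
-- ) -> Dict[str, List[str]]:
--     before_keys = set(before.keys())
--     after_keys = set(after.keys())
--     new_files = sorted(after_keys - before_keys)
--     modified_files = sorted(
--         path for path in (before_keys & after_keys)
--         if before[path] != after[path]
--     )
--     return {
--         "new_files": new_files[:10],
--         "modified_files": modified_files[:10],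
--     }
-- ===== SOURCE B (Python) =====
-- def _diff_files(before, after):
--     # Merge-join on key-sorted item lists: outputs come out already sorted,
--     # so no post-sort is needed.
--     b = sorted(before.items(), key=lambda kv: kv[0])
--     a = sorted(after.items(), key=lambda kv: kv[0])
--     new_files = []
--     modified_files = []
--     i = 0
--     for path, value in a:
--         while i < len(b) and b[i][0] < path:
--             i += 1
--         if i < len(b) and b[i][0] == path:
--             if b[i][1] != value:
--                 modified_files.append(path)
--             i += 1
--         else:
--             new_files.append(path)
--     return {
--         "new_files": new_files[:10],
--         "modified_files": modified_files[:10],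
--     }
-- ===== Notes on version B (the rewrite author's own statement) =====
-- stated objective: alternative
-- what changed: B sorts both item lists by key up front and classifies paths with a single two-pointer merge-join, emitting new/modified lists already in sorted order with no post-sort, instead of A's hash-set difference/intersection plus two final sorts
import Mathlib
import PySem

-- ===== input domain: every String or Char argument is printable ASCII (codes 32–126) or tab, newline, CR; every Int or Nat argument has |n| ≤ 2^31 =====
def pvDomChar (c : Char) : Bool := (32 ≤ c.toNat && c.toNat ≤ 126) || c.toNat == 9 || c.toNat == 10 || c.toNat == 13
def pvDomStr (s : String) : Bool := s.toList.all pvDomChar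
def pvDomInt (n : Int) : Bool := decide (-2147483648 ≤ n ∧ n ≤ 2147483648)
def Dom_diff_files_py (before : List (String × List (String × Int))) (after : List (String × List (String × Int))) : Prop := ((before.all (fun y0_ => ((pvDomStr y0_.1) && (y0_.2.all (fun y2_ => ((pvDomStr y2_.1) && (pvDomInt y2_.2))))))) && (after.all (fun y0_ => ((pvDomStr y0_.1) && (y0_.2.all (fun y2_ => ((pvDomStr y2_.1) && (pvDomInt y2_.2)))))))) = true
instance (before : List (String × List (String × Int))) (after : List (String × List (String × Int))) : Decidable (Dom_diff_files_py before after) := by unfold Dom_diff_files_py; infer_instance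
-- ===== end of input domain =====

-- B sorts both item lists by key and classifies paths with one two-pointer merge-join (outputs emerge already sorted), replacing A's set difference/intersection plus two final sorts (objective: alternative).


-- Shared primitive-level helper: Python's '==' on two inner dicts (order-insensitive,
-- duplicate keys collapsed last-wins as dict(...) does); used by both ports as the
-- semantics of 'before[path] != after[path]'.
def pyDictEq (x y : List (String × Int)) : Bool :=
  let dx := PySem.Dict.ofList x
  let dy := PySem.Dict.ofList y
  dx.size == dy.size && dx.items.all (fun kv => dy.get? kv.1 == some kv.2)

-- ===== PORT A =====
def diff_files_py (before : List (String × List (String × Int))) (after : List (String × List (String × Int))) : List (String × List String) :=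
  let beforeD := PySem.Dict.ofList before
  let afterD := PySem.Dict.ofList after
  let before_keys : PySem.Set String := PySem.Set.ofList beforeD.keys
  let after_keys : PySem.Set String := PySem.Set.ofList afterD.keys
  let new_files := PySem.List.sorted (PySem.Set.diff after_keys before_keys) (fun x => x) false
  let modified_files := PySem.List.sorted
      ((PySem.Set.inter before_keys after_keys).filter
        (fun path => !(pyDictEq (beforeD.getD path []) (afterD.getD path []))))
      (fun x => x) false
  [("new_files", PySem.List.slice new_files none (some 10)),
   ("modified_files", PySem.List.slice modified_files none (some 10))]

-- ===== PORT B =====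
-- the two-pointer merge-join of Source B: the inner while-loop advancing i is the
-- 'bk < p' branch dropping b's head; the for-loop over a is the recursion on as
def mergeDiff : List (String × List (String × Int)) → List (String × List (String × Int)) → List String × List String
  | _, [] => ([], [])
  | [], (p, _) :: as => let r := mergeDiff [] as; (p :: r.1, r.2)
  | (bk, bv) :: bs, (p, v) :: as =>
    if bk < p then mergeDiff bs ((p, v) :: as)
    else if bk = p then
      let r := mergeDiff bs as
      (r.1, if pyDictEq bv v then r.2 else p :: r.2)
    else
      let r := mergeDiff ((bk, bv) :: bs) as
      (p :: r.1, r.2)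
termination_by bs as => bs.length + as.length

def diff_files_py_alt (before : List (String × List (String × Int))) (after : List (String × List (String × Int))) : List (String × List String) :=
  let b := PySem.List.sorted (PySem.Dict.ofList before).items (fun kv => kv.1) false
  let a := PySem.List.sorted (PySem.Dict.ofList after).items (fun kv => kv.1) false
  let r := mergeDiff b a
  [("new_files", PySem.List.slice r.1 none (some 10)),
   ("modified_files", PySem.List.slice r.2 none (some 10))]

-- ===== PRECONDITION & SPEC =====
def Spec_diff_files_py (before : List (String × List (String × Int))) (after : List (String × List (String × Int))) (out : List (String × List String)) : Prop := out = diff_files_py_alt before after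
instance (before : List (String × List (String × Int))) (after : List (String × List (String × Int))) (out : List (String × List String)) : Decidable (Spec_diff_files_py before after out) := by unfold Spec_diff_files_py; infer_instance

-- ===== CLAIM (what is proved, stated in full; the proofs are below) =====
def Claim_equal_diff_files_py : Prop := ∀ (before : List (String × List (String × Int))) (after : List (String × List (String × Int))), Dom_diff_files_py before after → Spec_diff_files_py before after (diff_files_py before after)

-- ===== LEMMAS AND PROOFS =====

-- first-match association lookup: the reference semantics of the merge-join
def findVal (k : String) : List (String × List (String × Int)) → Option (List (String × Int))
  | [] => none
  | (k', v) :: rest => if k' = k then some v else findVal k rest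

theorem findVal_cons_skip (k bk : String) (bv : List (String × Int)) (bs : List (String × List (String × Int)))
    (h : bk ≠ k) : findVal k ((bk, bv) :: bs) = findVal k bs := by
  simp [findVal, h]

theorem findVal_eq_none (k : String) (l : List (String × List (String × Int)))
    (h : ∀ kv ∈ l, kv.1 ≠ k) : findVal k l = none := by
  induction l with
  | nil => rfl
  | cons c cs ih =>
    obtain ⟨ck, cv⟩ := c
    rw [findVal_cons_skip k ck cv cs (h (ck, cv) (List.mem_cons_self))]
    exact ih (fun kv hkv => h kv (List.mem_cons_of_mem _ hkv))

theorem findVal_eq_some_mem (k : String) (v : List (String × Int)) (l : List (String × List (String × Int)))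
    (h : findVal k l = some v) : (k, v) ∈ l := by
  induction l with
  | nil => simp [findVal] at h
  | cons c cs ih =>
    obtain ⟨ck, cv⟩ := c
    by_cases he : ck = k
    · subst he
      simp [findVal] at h
      subst h; exact List.mem_cons_self
    · rw [findVal_cons_skip k ck cv cs he] at h
      exact List.mem_cons_of_mem _ (ih h)

-- merge-join correctness on strictly key-sorted inputs
theorem mergeDiff_spec (bs as : List (String × List (String × Int)))
    (hb : bs.Pairwise (fun x y => x.1 < y.1)) (ha : as.Pairwise (fun x y => x.1 < y.1)) :
    mergeDiff bs as =
      ((as.filter (fun kv => (findVal kv.1 bs).isNone)).map (·.1),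
       (as.filter (fun kv => match findVal kv.1 bs with
          | none => false
          | some v => !pyDictEq v kv.2)).map (·.1)) := by
  induction bs, as using mergeDiff.induct with
  | case1 bs => simp [mergeDiff]
  | case2 p v as ih =>
    rw [List.pairwise_cons] at ha
    simp [mergeDiff, ih (by exact hb) ha.2, findVal]
  | case3 bk bv bs p v as hlt ih =>
    rw [List.pairwise_cons] at hb ha
    have hskip : ∀ kv ∈ (p, v) :: as, findVal kv.1 ((bk, bv) :: bs) = findVal kv.1 bs := by
      rintro kv hkv
      apply findVal_cons_skip
      rcases List.mem_cons.1 hkv with h | h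
      · rw [h]; exact ne_of_lt hlt
      · exact ne_of_lt (lt_trans hlt (ha.1 _ h))
    rw [mergeDiff, if_pos hlt, ih hb.2 (List.pairwise_cons.2 ha)]
    simp only [Prod.mk.injEq]
    constructor <;> · congr 1; apply List.filter_congr; intro kv hkv; rw [hskip kv hkv]
  | case4 bv bs k av as hnlt ih =>
    rw [List.pairwise_cons] at hb ha
    rw [mergeDiff, if_neg hnlt, if_pos rfl]
    simp only [ih hb.2 ha.2]
    simp only [Prod.mk.injEq]
    constructor
    · simp only [List.filter_cons, findVal]
      congr 1; apply List.filter_congr; intro kv hkv; rw [if_neg (ne_of_lt (ha.1 kv hkv))]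
    · simp only [List.filter_cons, findVal]
      by_cases hc : pyDictEq bv av = true
      · simp only [hc, Bool.not_true, Bool.false_eq_true, if_false, if_true]
        congr 1; apply List.filter_congr; intro kv hkv; rw [if_neg (ne_of_lt (ha.1 kv hkv))]
      · simp only [Bool.not_eq_true] at hc
        simp only [hc, Bool.not_false, if_true, Bool.false_eq_true, if_false, List.map_cons]
        congr 2; apply List.filter_congr; intro kv hkv; rw [if_neg (ne_of_lt (ha.1 kv hkv))]
  | case5 bk bv bs p v as hnlt hne ih =>
    rw [List.pairwise_cons] at hb ha
    have hgt : p < bk := lt_of_le_of_ne (not_lt.1 hnlt) (fun h => hne h.symm)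
    have hhead : findVal p ((bk, bv) :: bs) = none := by
      apply findVal_eq_none
      rintro kv hkv
      rcases List.mem_cons.1 hkv with h | h
      · rw [h]; exact ne_of_gt hgt
      · exact ne_of_gt (lt_trans hgt (hb.1 _ h))
    have hskip : ∀ kv ∈ as, findVal kv.1 ((bk, bv) :: bs) = findVal kv.1 ((bk, bv) :: bs) := fun _ _ => rfl
    rw [mergeDiff, if_neg hnlt, if_neg hne,
        ih (List.pairwise_cons.2 hb) ha.2]
    simp [hhead]

-- findVal on any permutation of a nodup-key dict's items agrees with the dict lookup
theorem findVal_isSome_of_mem (k : String) (v : List (String × Int))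
    (l : List (String × List (String × Int))) (h : (k, v) ∈ l) : (findVal k l).isSome := by
  induction l with
  | nil => simp at h
  | cons c cs ih =>
    obtain ⟨ck, cv⟩ := c
    by_cases he : ck = k
    · subst he; simp [findVal]
    · rw [findVal_cons_skip k ck cv cs he]
      rcases List.mem_cons.1 h with h | h
      · exact absurd (congrArg Prod.fst h).symm he
      · exact ih h

theorem findVal_eq_get? (d : PySem.Dict String (List (String × Int)))
    (l : List (String × List (String × Int))) (hperm : l.Perm d.items)
    (hnd : d.keys.Nodup) (k : String) : findVal k l = d.get? k := by
  cases h : findVal k l with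
  | some v =>
    exact (PySem.Dict.get?_of_mem_items d (hperm.mem_iff.1 (findVal_eq_some_mem k v l h)) hnd).symm
  | none =>
    cases hg : d.get? k with
    | none => rfl
    | some v =>
      have hm : (k, v) ∈ l := hperm.mem_iff.2 (PySem.Dict.mem_items_of_get?_eq_some d hg)
      have := findVal_isSome_of_mem k v l hm
      rw [h] at this
      simp at this

-- strict key-sortedness of the sorted items of a nodup-key dict
theorem sorted_items_pairwise (d : PySem.Dict String (List (String × Int))) (hnd : d.keys.Nodup) :
    (PySem.List.sorted d.items (fun kv => kv.1) false).Pairwise (fun x y => x.1 < y.1) := by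
  have hle := PySem.List.sorted_pairwise d.items (fun kv => kv.1)
  have hperm : ((PySem.List.sorted d.items (fun kv => kv.1) false).map (·.1)).Perm d.keys :=
    (PySem.List.sorted_perm d.items (fun kv => kv.1) false).map (·.1)
  have hnodup : ((PySem.List.sorted d.items (fun kv => kv.1) false).map (·.1)).Nodup :=
    hperm.nodup_iff.2 hnd
  have hne : (PySem.List.sorted d.items (fun kv => kv.1) false).Pairwise (fun x y => x.1 ≠ y.1) :=
    (List.pairwise_map).1 hnodup
  exact (hle.and hne).imp (fun h => lt_of_le_of_ne h.1 h.2)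

-- A's set expressions as key filters (as in the hash version)
theorem pv_new_set (bd ad : PySem.Dict String (List (String × Int))) (han : ad.keys.Nodup) :
    PySem.Set.diff (PySem.Set.ofList ad.keys) (PySem.Set.ofList bd.keys)
    = ad.keys.filter (fun x => (bd.get? x).isNone) := by
  show (PySem.Set.ofList ad.keys).filter _ = _
  rw [PySem.Set.ofList_eq_self_of_nodup ad.keys han]
  apply List.filter_congr
  intro x _
  cases h : bd.get? x with
  | none =>
    have hx := (PySem.Dict.get?_eq_none_iff_not_mem_keys bd x).1 h
    simp [PySem.Set.contains, PySem.Set.mem_ofList, hx]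
  | some v =>
    have hx : x ∈ bd.keys := by
      by_contra hc
      rw [← PySem.Dict.get?_eq_none_iff_not_mem_keys] at hc
      simp [h] at hc
    simp [PySem.Set.contains, PySem.Set.mem_ofList, hx]

theorem pv_mod_perm (bd ad : PySem.Dict String (List (String × Int)))
    (hbn : bd.keys.Nodup) (han : ad.keys.Nodup) :
    ((PySem.Set.inter (PySem.Set.ofList bd.keys) (PySem.Set.ofList ad.keys)).filter
        (fun path => !(pyDictEq (bd.getD path []) (ad.getD path [])))).Perm
      (ad.keys.filter (fun x =>
        match bd.get? x with
        | none => false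
        | some v => !(pyDictEq v (ad.getD x [])))) := by
  rw [PySem.Set.ofList_eq_self_of_nodup bd.keys hbn]
  apply (List.perm_ext_iff_of_nodup
      (List.Nodup.filter _ (PySem.Set.nodup_inter _ _ hbn))
      (List.Nodup.filter _ han)).2
  intro x
  simp only [List.mem_filter, PySem.Set.mem_inter, PySem.Set.mem_ofList]
  cases h : bd.get? x with
  | none =>
    have hx := (PySem.Dict.get?_eq_none_iff_not_mem_keys bd x).1 h
    simp [hx]
  | some v =>
    have hx : x ∈ bd.keys := by
      by_contra hc
      rw [← PySem.Dict.get?_eq_none_iff_not_mem_keys] at hc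
      simp [h] at hc
    have hg : bd.getD x [] = v := PySem.Dict.getD_of_get?_eq_some bd _ h
    simp [hx, hg]

-- ===== VERDICT (by name: the statement is the Claim_ definition above) =====
theorem diff_files_py_spec : Claim_equal_diff_files_py := by
  intro before after _
  unfold Spec_diff_files_py
  simp only [diff_files_py, diff_files_py_alt]
  have hbn := PySem.Dict.nodup_keys_ofList (κ := String) (ν := List (String × Int)) before
  have han := PySem.Dict.nodup_keys_ofList (κ := String) (ν := List (String × Int)) after
  set bd := PySem.Dict.ofList before with hbd
  set ad := PySem.Dict.ofList after with had
  set asrt := PySem.List.sorted ad.items (fun kv => kv.1) false with hasrt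
  have haperm : asrt.Perm ad.items := PySem.List.sorted_perm _ _ _
  have hmap : (asrt.map (·.1)).Perm ad.keys := haperm.map (·.1)
  have hbp := sorted_items_pairwise bd hbn
  have hap := sorted_items_pairwise ad han
  rw [mergeDiff_spec _ _ hbp hap]
  -- rewrite findVal through the b-sorted list into the dict lookup
  have hfv : ∀ k, findVal k (PySem.List.sorted bd.items (fun kv => kv.1) false) = bd.get? k :=
    findVal_eq_get? bd _ (PySem.List.sorted_perm _ _ _) hbn
  -- new files
  have hnewB : (asrt.filter (fun kv => (findVal kv.1 (PySem.List.sorted bd.items (fun kv => kv.1) false)).isNone)).map (·.1)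
      = (asrt.map (·.1)).filter (fun x => (bd.get? x).isNone) := by
    have h1 : asrt.filter (fun kv => (findVal kv.1 (PySem.List.sorted bd.items (fun kv => kv.1) false)).isNone)
        = asrt.filter ((fun x => (bd.get? x).isNone) ∘ (·.1)) :=
      List.filter_congr (fun kv _ => by simp only [Function.comp]; rw [hfv kv.1])
    rw [h1, ← List.filter_map]
  have hmodB : (asrt.filter (fun kv => match findVal kv.1 (PySem.List.sorted bd.items (fun kv => kv.1) false) with
        | none => false
        | some v => !pyDictEq v kv.2)).map (·.1)
      = (asrt.map (·.1)).filter (fun x => match bd.get? x with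
        | none => false
        | some v => !(pyDictEq v (ad.getD x []))) := by
    have h1 : asrt.filter (fun kv => match findVal kv.1 (PySem.List.sorted bd.items (fun kv => kv.1) false) with
          | none => false
          | some v => !pyDictEq v kv.2)
        = asrt.filter ((fun x => match bd.get? x with
          | none => false
          | some v => !(pyDictEq v (ad.getD x []))) ∘ (·.1)) := by
      apply List.filter_congr
      intro kv hkv
      have hv : ad.getD kv.1 [] = kv.2 :=
        PySem.Dict.getD_of_mem_items ad (haperm.subset hkv) han []
      simp only [Function.comp]
      rw [hfv kv.1, hv]
    rw [h1, ← List.filter_map]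
  rw [hnewB, hmodB]
  -- the key lists are strictly sorted
  have hkeys : (asrt.map (·.1)).Pairwise (· < ·) := (List.pairwise_map).2 hap
  have hnewS : ((asrt.map (·.1)).filter (fun x => (bd.get? x).isNone)).Pairwise (· < ·) :=
    hkeys.sublist List.filter_sublist
  have hmodS : ((asrt.map (·.1)).filter (fun x => match bd.get? x with
        | none => false
        | some v => !(pyDictEq v (ad.getD x [])))).Pairwise (· < ·) :=
    hkeys.sublist List.filter_sublist
  have e1 := PySem.List.sorted_eq_of_perm_of_pairwise_lt _ _ (fun x => x)
    (hmap.filter (fun x => (bd.get? x).isNone)) hnewS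
  have e2 := PySem.List.sorted_eq_of_perm_of_pairwise_lt _ _ (fun x => x)
    ((hmap.filter (fun x => match bd.get? x with
      | none => false
      | some v => !(pyDictEq v (ad.getD x [])))).trans
      (pv_mod_perm bd ad hbn han).symm) hmodS
  rw [pv_new_set bd ad han, e1, e2]
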